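-- pv_equiv track=rewrite | github.com/OxQuasar/nous-memories | iching/logoswen/iter3/orientation_enumeration.py | count_valid_for_component
-- ===== SOURCE A (Python) =====
-- def count_valid_for_component(comp_pairs, comp_constraints):
--     """
--     Count valid orientation assignments for pairs in a connected component.
--     comp_pairs: sorted list of pair indices
--     comp_constraints: dict of bridge_idx -> forbidden set
--     """
--     n = len(comp_pairs)
--     pair_to_local = {p: i for i, p in enumerate(comp_pairs)}
--
--     count = 0
--     for bits in range(2**n):
--         orientation = {}
--         for i, p in enumerate(comp_pairs):
--             orientation[p] = (bits >> i) & 1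
--
--         valid = True
--         for k, forbidden in comp_constraints.items():
--             if k in orientation and k+1 in orientation:
--                 if (orientation[k], orientation[k+1]) in forbidden:
--                     valid = False
--                     break
--
--         if valid:
--             count += 1
--
--     return count
-- ===== SOURCE B (Python) =====
-- def count_valid_for_component(comp_pairs, comp_constraints):
--     """Linear transfer-matrix DP over the sorted distinct pair indices,
--     times 2**(number of duplicate entries)."""
--     vals = sorted(set(comp_pairs))
--     if not vals:
--         return 1
--     f0, f1 = 1, 1
--     for prev, v in zip(vals, vals[1:]):
--         if v == prev + 1 and prev in comp_constraints:
--             forbidden = comp_constraints[prev]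
--             g0 = (0 if (0, 0) in forbidden else f0) + (0 if (1, 0) in forbidden else f1)
--             g1 = (0 if (0, 1) in forbidden else f0) + (0 if (1, 1) in forbidden else f1)
--         else:
--             g0 = f0 + f1
--             g1 = f0 + f1
--         f0, f1 = g0, g1
--     return (f0 + f1) * 2 ** (len(comp_pairs) - len(vals))
-- ===== Notes on version B (the rewrite author's own statement) =====
-- stated objective: faster
-- what changed: Replaced the 2^n enumeration of all orientation bit-vectors by a linear transfer-matrix DP along the sorted distinct pair indices (constraints only ever link consecutive indices, and only the last occurrence of a duplicated index matters, so duplicates contribute a factor 2 each).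
import Mathlib
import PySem

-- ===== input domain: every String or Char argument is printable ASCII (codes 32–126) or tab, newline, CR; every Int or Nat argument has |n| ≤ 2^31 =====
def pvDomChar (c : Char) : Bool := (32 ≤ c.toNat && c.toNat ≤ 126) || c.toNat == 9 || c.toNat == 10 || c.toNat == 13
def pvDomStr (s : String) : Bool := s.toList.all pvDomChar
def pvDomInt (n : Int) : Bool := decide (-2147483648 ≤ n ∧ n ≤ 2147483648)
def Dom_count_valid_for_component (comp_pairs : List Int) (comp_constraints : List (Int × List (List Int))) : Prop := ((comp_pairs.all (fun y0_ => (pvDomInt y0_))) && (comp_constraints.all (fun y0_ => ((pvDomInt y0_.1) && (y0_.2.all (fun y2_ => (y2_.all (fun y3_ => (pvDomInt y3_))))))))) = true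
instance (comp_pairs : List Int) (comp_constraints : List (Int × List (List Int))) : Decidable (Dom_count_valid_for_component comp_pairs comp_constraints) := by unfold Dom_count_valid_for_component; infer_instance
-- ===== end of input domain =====

-- B replaces A's 2^n enumeration of orientation bit-vectors by a linear transfer-matrix DP
-- over the sorted distinct pair indices (objective: faster, asymptotically).

-- ===== PORT A =====
-- 'bits >> i' is ported as floor division by 2**i and '& 1' as mod 2 — exact for every
-- Python int (x >> i == x // 2**i and x & 1 == x % 2 hold for all Python ints).
def pvOrientA (comp_pairs : List Int) (bits : Int) : PySem.Dict Int Int :=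
  (PySem.List.enumerate comp_pairs).foldl
    (fun o ip => o.insert ip.2 (PySem.Int.mod (PySem.Int.floordiv bits (2 ^ ip.1.toNat)) 2))
    PySem.Dict.empty

-- the 'for k, forbidden in comp_constraints.items()' loop with its early break
def pvCheckA (o : PySem.Dict Int Int) : List (Int × List (List Int)) → Bool
  | [] => true
  | (k, forbidden) :: rest =>
    if o.contains k && o.contains (k + 1) then
      match o.get? k, o.get? (k + 1) with
      | some a, some b => if forbidden.contains [a, b] then false else pvCheckA o rest
      | _, _ => pvCheckA o rest
    else pvCheckA o rest

-- (A also builds an unused dict 'pair_to_local'; it never affects the result, so it is omitted)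
def count_valid_for_component (comp_pairs : List Int) (comp_constraints : List (Int × List (List Int))) : Int :=
  let n := comp_pairs.length
  (PySem.List.pyRange 0 (2 ^ n) 1).foldl
    (fun count bits =>
      if pvCheckA (pvOrientA comp_pairs bits) comp_constraints then count + 1 else count)
    0

-- ===== PORT B =====
-- first-match association lookup = Python dict access ('prev in comp_constraints' / comp_constraints[prev])
def pvFindForb : List (Int × List (List Int)) → Int → Option (List (List Int))
  | [], _ => none
  | (k, F) :: rest, x => if k = x then some F else pvFindForb rest x

-- one step of Source B's loop 'for prev, v in zip(vals, vals[1:])' over the state (f0, f1)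
def pvStepB (cs : List (Int × List (List Int))) (f : Int × Int) (pv : Int × Int) : Int × Int :=
  if pv.2 = pv.1 + 1 ∧ (pvFindForb cs pv.1).isSome then
    let F := (pvFindForb cs pv.1).getD []
    ((if F.contains [0, 0] then 0 else f.1) + (if F.contains [1, 0] then 0 else f.2),
     (if F.contains [0, 1] then 0 else f.1) + (if F.contains [1, 1] then 0 else f.2))
  else (f.1 + f.2, f.1 + f.2)

def count_valid_for_component_alt (comp_pairs : List Int) (comp_constraints : List (Int × List (List Int))) : Int :=
  let vals := PySem.List.sorted (PySem.Set.ofList comp_pairs) (fun x => x) false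
  if vals = [] then 1
  else
    let fz := (vals.zip vals.tail).foldl (pvStepB comp_constraints) (1, 1)
    (fz.1 + fz.2) * 2 ^ (comp_pairs.length - vals.length)

-- ===== PRECONDITION & SPEC =====
-- Pre_ requires distinct keys in comp_constraints: the argument encodes a Python dict, whose
-- keys are always distinct, so no input reachable from Python is excluded.
def Pre_count_valid_for_component (comp_pairs : List Int) (comp_constraints : List (Int × List (List Int))) : Prop :=
  (comp_constraints.map Prod.fst).Nodup
instance (comp_pairs : List Int) (comp_constraints : List (Int × List (List Int))) : Decidable (Pre_count_valid_for_component comp_pairs comp_constraints) := by unfold Pre_count_valid_for_component; infer_instance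

def pvWitness_count_valid_for_component : List Int × (List (Int × List (List Int))) := ([0, 1], [(0, [[0, 1]])])

def Spec_count_valid_for_component (comp_pairs : List Int) (comp_constraints : List (Int × List (List Int))) (out : Int) : Prop := out = count_valid_for_component_alt comp_pairs comp_constraints
instance (comp_pairs : List Int) (comp_constraints : List (Int × List (List Int))) (out : Int) : Decidable (Spec_count_valid_for_component comp_pairs comp_constraints out) := by unfold Spec_count_valid_for_component; infer_instance

-- ===== CLAIM (what is proved, stated in full; the proofs are below) =====
def Claim_equal_count_valid_for_component : Prop := ∀ (comp_pairs : List Int) (comp_constraints : List (Int × List (List Int))), Dom_count_valid_for_component comp_pairs comp_constraints → Pre_count_valid_for_component comp_pairs comp_constraints → Spec_count_valid_for_component comp_pairs comp_constraints (count_valid_for_component comp_pairs comp_constraints)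

-- ===== LEMMAS AND PROOFS =====

-- abstract assignments: Int → Option Int, with functional update
def pvUpd (σ : Int → Option Int) (p b : Int) : Int → Option Int :=
  fun k => if k = p then some b else σ k

def pvEntryOK (k : Int) (F : List (List Int)) (σ : Int → Option Int) : Bool :=
  match σ k, σ (k + 1) with
  | some a, some b => !F.contains [a, b]
  | _, _ => true

def pvOkF (cs : List (Int × List (List Int))) (σ : Int → Option Int) : Bool :=
  cs.all (fun kF => pvEntryOK kF.1 kF.2 σ)

-- the brute-force count, abstracted: sum over all bit choices for the listed pairs
def pvM (cs : List (Int × List (List Int))) : List Int → (Int → Option Int) → Int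
  | [], σ => if pvOkF cs σ then 1 else 0
  | p :: ps, σ => pvM cs ps (pvUpd σ p 0) + pvM cs ps (pvUpd σ p 1)

-- the assignment encoded by an integer's bits, consumed low bit first
def pvBitsσ : List Int → Nat → (Int → Option Int) → (Int → Option Int)
  | [], _, σ => σ
  | p :: ps, m, σ => pvBitsσ ps (m / 2) (pvUpd σ p ((m % 2 : Nat) : Int))

-- explicit bit lists
def pvBL : Nat → List (List Int)
  | 0 => [[]]
  | n + 1 => (pvBL n).map (fun bs => 0 :: bs) ++ (pvBL n).map (fun bs => 1 :: bs)

def pvUpds (σ : Int → Option Int) : List (Int × Int) → (Int → Option Int)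
  | [] => σ
  | vb :: r => pvUpds (pvUpd σ vb.1 vb.2) r

def pvLook : List (Int × Int) → Int → Option Int
  | [], _ => none
  | vb :: r, k => if k = vb.1 then some vb.2 else pvLook r k

def pvAdjAll (k : Int) (F : List (List Int)) (L : List (Int × Int)) : Bool :=
  (L.zip L.tail).all
    (fun pq => !(decide (pq.1.1 = k) && decide (pq.2.1 = pq.1.1 + 1) && F.contains [pq.1.2, pq.2.2]))

def pvEdge (cs : List (Int × List (List Int))) (v a w b : Int) : Bool :=
  cs.all (fun kF => !(decide (v = kF.1) && decide (w = v + 1) && kF.2.contains [a, b]))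

def pvECh (cs : List (Int × List (List Int))) : Int → Int → List (Int × Int) → Bool
  | _, _, [] => true
  | pv, pb, vb :: r => pvEdge cs pv pb vb.1 vb.2 && pvECh cs vb.1 vb.2 r

def pvG (cs : List (Int × List (List Int))) : Int → Int → List Int → Int
  | _, _, [] => 1
  | pv, pb, v :: vs =>
    (if pvEdge cs pv pb v 0 then pvG cs v 0 vs else 0) +
    (if pvEdge cs pv pb v 1 then pvG cs v 1 vs else 0)

-- keep-last deduplication
def pvDdl : List Int → List Int
  | [] => []
  | p :: ps => if p ∈ ps then pvDdl ps else p :: pvDdl ps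

-- ---- basic update lemmas ----
lemma pvUpd_self (σ : Int → Option Int) (p b c : Int) : pvUpd (pvUpd σ p b) p c = pvUpd σ p c := by
  funext k; simp only [pvUpd]; split <;> rfl

lemma pvUpd_comm (σ : Int → Option Int) {p q : Int} (h : p ≠ q) (b c : Int) :
    pvUpd (pvUpd σ p b) q c = pvUpd (pvUpd σ q c) p b := by
  funext k; simp only [pvUpd]
  by_cases h1 : k = q <;> by_cases h2 : k = p <;> simp [h1, h2] <;> omega

-- ---- A-side: the literal port equals pvM ----
lemma pvOrientA_get (ps : List Int) (m : Nat) :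
    ∀ (s : Nat) (o : PySem.Dict Int Int) (k : Int),
    ((PySem.List.enumerate ps (s : Int)).foldl
      (fun o ip => o.insert ip.2 (PySem.Int.mod (PySem.Int.floordiv (m : Int) (2 ^ ip.1.toNat)) 2)) o).get? k
    = pvBitsσ ps (m / 2 ^ s) (fun j => o.get? j) k := by
  induction ps with
  | nil => intro s o k; rfl
  | cons p ps ih =>
    intro s o k
    rw [PySem.List.enumerate_cons]
    simp only [List.foldl_cons]
    have hv : PySem.Int.mod (PySem.Int.floordiv (m : Int) (2 ^ ((s : Int)).toNat)) 2
        = ((m / 2 ^ s % 2 : Nat) : Int) := by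
      rw [Int.toNat_natCast, show ((2 : Int) ^ s) = ((2 ^ s : Nat) : Int) from by push_cast; ring,
        PySem.Int.floordiv_natCast, show (2 : Int) = ((2 : Nat) : Int) from by norm_num,
        PySem.Int.mod_natCast]
    have hcast : ((s : Int)) + 1 = ((s + 1 : Nat) : Int) := by push_cast; ring
    rw [hcast, ih (s + 1) _ k]
    have hdiv : m / 2 ^ (s + 1) = m / 2 ^ s / 2 := by
      rw [Nat.div_div_eq_div_mul, pow_succ]
    have hfun : (fun j => (o.insert p
          (PySem.Int.mod (PySem.Int.floordiv (m : Int) (2 ^ ((s : Int)).toNat)) 2)).get? j)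
        = pvUpd (fun j => o.get? j) p ((m / 2 ^ s % 2 : Nat) : Int) := by
      funext j
      rw [hv, PySem.Dict.get?_insert]
      rfl
    rw [hdiv, hfun]
    rfl

lemma pvCheckA_eq_okF (o : PySem.Dict Int Int) (cs : List (Int × List (List Int))) :
    pvCheckA o cs = pvOkF cs (fun k => o.get? k) := by
  induction cs with
  | nil => rfl
  | cons kF rest ih =>
    obtain ⟨k, F⟩ := kF
    rw [pvOkF, List.all_cons, ← pvOkF]
    simp only [pvCheckA]
    rw [PySem.Dict.contains_eq_isSome_get?, PySem.Dict.contains_eq_isSome_get?]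
    cases h1 : o.get? k <;> cases h2 : o.get? (k + 1) <;>
      simp [pvEntryOK, h1, h2, ih] <;>
      (try (by_cases hc : [_, _] ∈ F <;> simp [hc, ih]))

lemma pvRangeSum (t : Nat) (g : Nat → Int) :
    ((List.range (2 * t)).map g).sum = ((List.range t).map (fun q => g (2 * q) + g (2 * q + 1))).sum := by
  induction t with
  | zero => simp
  | succ t ih =>
    have h1 : 2 * (t + 1) = (2 * t + 1) + 1 := by ring
    rw [h1, List.range_succ, List.range_succ, List.range_succ]
    simp only [List.map_append, List.sum_append, List.map_cons, List.map_nil, List.sum_cons,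
      List.sum_nil, ih]
    ring

lemma pvMsum (cs : List (Int × List (List Int))) (ps : List Int) :
    ∀ σ, ((List.range (2 ^ ps.length)).map
        (fun m => if pvOkF cs (pvBitsσ ps m σ) then (1 : Int) else 0)).sum = pvM cs ps σ := by
  induction ps with
  | nil => intro σ; simp [pvM, pvBitsσ]
  | cons p ps ih =>
    intro σ
    have h2 : 2 ^ (p :: ps).length = 2 * 2 ^ ps.length := by
      simp [List.length_cons, pow_succ]; ring
    rw [h2, pvRangeSum]
    have h3 : ∀ q : Nat,
        (if pvOkF cs (pvBitsσ (p :: ps) (2 * q) σ) then (1 : Int) else 0)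
          = (if pvOkF cs (pvBitsσ ps q (pvUpd σ p 0)) then (1 : Int) else 0) := by
      intro q
      have e1 : 2 * q / 2 = q := by omega
      have e2 : 2 * q % 2 = 0 := by omega
      simp [pvBitsσ, e1, e2]
    have h4 : ∀ q : Nat,
        (if pvOkF cs (pvBitsσ (p :: ps) (2 * q + 1) σ) then (1 : Int) else 0)
          = (if pvOkF cs (pvBitsσ ps q (pvUpd σ p 1)) then (1 : Int) else 0) := by
      intro q
      have e1 : (2 * q + 1) / 2 = q := by omega
      have e2 : (2 * q + 1) % 2 = 1 := by omega
      simp [pvBitsσ, e1, e2]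
    calc ((List.range (2 ^ ps.length)).map
            (fun q => (if pvOkF cs (pvBitsσ (p :: ps) (2 * q) σ) then (1 : Int) else 0)
              + (if pvOkF cs (pvBitsσ (p :: ps) (2 * q + 1) σ) then (1 : Int) else 0))).sum
        = ((List.range (2 ^ ps.length)).map
            (fun q => (if pvOkF cs (pvBitsσ ps q (pvUpd σ p 0)) then (1 : Int) else 0)
              + (if pvOkF cs (pvBitsσ ps q (pvUpd σ p 1)) then (1 : Int) else 0))).sum := by
          apply congrArg; apply List.map_congr_left; intro q _; rw [h3, h4]
      _ = pvM cs (p :: ps) σ := by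
          rw [PySem.List.sum_map_add_int, ih, ih]; rfl

lemma pvFoldCount {α : Type} (l : List α) (p : α → Bool) :
    ∀ a : Int, l.foldl (fun acc x => if p x then acc + 1 else acc) a
      = a + (l.map (fun x => if p x then (1 : Int) else 0)).sum := by
  induction l with
  | nil => intro a; simp
  | cons x l ih =>
    intro a
    simp only [List.foldl_cons, List.map_cons, List.sum_cons, ih]
    cases hp : p x <;> simp [hp] <;> ring

lemma pvCountA (cp : List Int) (cs : List (Int × List (List Int))) :
    count_valid_for_component cp cs = pvM cs cp (fun _ => none) := by
  show (PySem.List.pyRange 0 (2 ^ cp.length) 1).foldl _ 0 = _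
  rw [PySem.List.pyRange_one]
  have h1 : (((2 : Int) ^ cp.length) - 0).toNat = 2 ^ cp.length := by
    rw [sub_zero, show ((2 : Int) ^ cp.length) = ((2 ^ cp.length : Nat) : Int) from by
      push_cast; ring, Int.toNat_natCast]
  rw [h1]
  simp only [List.foldl_map]
  rw [pvFoldCount (List.range (2 ^ cp.length))
    (fun km => pvCheckA (pvOrientA cp ((0 : Int) + (km : Int))) cs) 0, zero_add]
  rw [← pvMsum cs cp (fun _ => none)]
  apply congrArg
  apply List.map_congr_left
  intro mm _
  rw [pvCheckA_eq_okF]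
  have hfun : (fun j => (pvOrientA cp ((0 : Int) + (mm : Int))).get? j)
      = pvBitsσ cp mm (fun _ => none) := by
    funext j
    have h := pvOrientA_get cp mm 0 PySem.Dict.empty j
    simp only [Nat.cast_zero, pow_zero, Nat.div_one, PySem.Dict.get?_empty] at h
    rw [zero_add, pvOrientA]
    exact h
  rw [hfun]

-- ---- duplicates and permutations ----
lemma pvM_upd_mem (cs : List (Int × List (List Int))) (ps : List Int) :
    ∀ (σ : Int → Option Int) (p b : Int), p ∈ ps → pvM cs ps (pvUpd σ p b) = pvM cs ps σ := by
  induction ps with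
  | nil => intro σ p b h; simp at h
  | cons q ps ih =>
    intro σ p b h
    simp only [pvM]
    rcases eq_or_ne q p with rfl | hne
    · rw [pvUpd_self, pvUpd_self]
    · have hp : p ∈ ps := by
        rcases List.mem_cons.mp h with rfl | hp
        · exact absurd rfl hne
        · exact hp
      rw [pvUpd_comm σ hne.symm b 0, pvUpd_comm σ hne.symm b 1, ih _ p b hp, ih _ p b hp]

lemma pvDdl_mem (ps : List Int) (x : Int) : x ∈ pvDdl ps ↔ x ∈ ps := by
  induction ps with
  | nil => simp [pvDdl]
  | cons p ps ih =>
    by_cases hp : p ∈ ps <;> simp [pvDdl, hp, ih]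
    intro h; subst h; exact hp

lemma pvDdl_nodup (ps : List Int) : (pvDdl ps).Nodup := by
  induction ps with
  | nil => simp [pvDdl]
  | cons p ps ih =>
    by_cases hp : p ∈ ps <;> simp [pvDdl, hp, ih, pvDdl_mem]

lemma pvDdl_len_le (ps : List Int) : (pvDdl ps).length ≤ ps.length := by
  induction ps with
  | nil => simp [pvDdl]
  | cons p ps ih => by_cases hp : p ∈ ps <;> simp [pvDdl, hp] <;> omega

lemma pvM_dup (cs : List (Int × List (List Int))) (ps : List Int) :
    ∀ σ, pvM cs ps σ = 2 ^ (ps.length - (pvDdl ps).length) * pvM cs (pvDdl ps) σ := by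
  induction ps with
  | nil => intro σ; simp [pvDdl]
  | cons p ps ih =>
    intro σ
    have hlen := pvDdl_len_le ps
    by_cases hp : p ∈ ps
    · simp only [pvM, pvDdl, if_pos hp]
      rw [pvM_upd_mem cs ps _ _ _ hp, pvM_upd_mem cs ps _ _ _ hp, ih]
      have he : (p :: ps).length - (pvDdl ps).length = (ps.length - (pvDdl ps).length) + 1 := by
        simp only [List.length_cons]; omega
      rw [he, pow_succ]
      ring
    · simp only [pvM, pvDdl, if_neg hp]
      rw [ih, ih]
      have he : (p :: ps).length - (p :: pvDdl ps).length = ps.length - (pvDdl ps).length := by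
        simp only [List.length_cons]; omega
      rw [he]
      ring

lemma pvM_perm (cs : List (Int × List (List Int))) {ps qs : List Int} (h : ps.Perm qs) :
    ps.Nodup → ∀ σ, pvM cs ps σ = pvM cs qs σ := by
  induction h with
  | nil => intro _ σ; rfl
  | cons x h ih =>
    intro hnd σ
    simp only [pvM]
    rw [ih (List.nodup_cons.mp hnd).2, ih (List.nodup_cons.mp hnd).2]
  | swap x y l =>
    intro hnd σ
    have hxy : y ≠ x := by
      intro e; subst e
      exact (List.nodup_cons.mp hnd).1 (by simp)
    simp only [pvM]
    rw [pvUpd_comm σ hxy 0 0, pvUpd_comm σ hxy 0 1, pvUpd_comm σ hxy 1 0, pvUpd_comm σ hxy 1 1]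
    ring
  | trans h1 h2 ih1 ih2 =>
    intro hnd σ
    rw [ih1 hnd, ih2 (h1.nodup hnd)]

-- ---- bit-list expansion of pvM ----
lemma pvBL_len {n : Nat} {bs : List Int} (h : bs ∈ pvBL n) : bs.length = n := by
  induction n generalizing bs with
  | zero => simp [pvBL] at h; simp [h]
  | succ n ih =>
    simp [pvBL] at h
    rcases h with ⟨cs, hcs, rfl⟩ | ⟨cs, hcs, rfl⟩ <;> simp [ih hcs]

lemma pvM_BL (cs : List (Int × List (List Int))) (ps : List Int) :
    ∀ σ, pvM cs ps σ = ((pvBL ps.length).map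
      (fun bs => if pvOkF cs (pvUpds σ (ps.zip bs)) then (1 : Int) else 0)).sum := by
  induction ps with
  | nil => intro σ; simp [pvM, pvBL, pvUpds]
  | cons p ps ih =>
    intro σ
    simp only [pvM, List.length_cons, pvBL, List.map_append, List.map_map, List.sum_append]
    rw [ih (pvUpd σ p 0), ih (pvUpd σ p 1)]
    congr 1

-- ---- lookups ----
lemma pvLook_none {L : List (Int × Int)} {k : Int} (h : ∀ p ∈ L, p.1 ≠ k) : pvLook L k = none := by
  induction L with
  | nil => rfl
  | cons vb r ih =>
    have h1 := h vb (by simp)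
    have h2 : pvLook r k = none := ih (fun p hp => h p (by simp [hp]))
    simp [pvLook, h2, Ne.symm h1]

lemma pvUpds_eq_look (L : List (Int × Int)) :
    ∀ (σ : Int → Option Int) (k : Int), (L.map Prod.fst).Nodup →
    pvUpds σ L k = match pvLook L k with | some b => some b | none => σ k := by
  induction L with
  | nil => intro σ k _; rfl
  | cons vb r ih =>
    intro σ k hnd
    have hnotin : vb.1 ∉ r.map Prod.fst := (List.nodup_cons.mp (by simpa using hnd)).1
    have hnd' : (r.map Prod.fst).Nodup := (List.nodup_cons.mp (by simpa using hnd)).2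
    show pvUpds (pvUpd σ vb.1 vb.2) r k = _
    rw [ih _ k hnd']
    by_cases hk : k = vb.1
    · have hr : pvLook r k = none := pvLook_none (fun p hp => by
        intro e; apply hnotin
        have : p.1 = vb.1 := by rw [e, hk]
        rw [← this]; exact List.mem_map_of_mem hp)
      rw [hk] at hr
      simp [pvLook, hk, hr, pvUpd]
    · cases hl : pvLook r k <;> simp [pvLook, hk, pvUpd, hl]

-- ---- Bool all helpers ----
lemma pvAll_and {α : Type} (m : List α) (f g : α → Bool) :
    m.all (fun y => f y && g y) = (m.all f && m.all g) := by
  induction m with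
  | nil => rfl
  | cons x m ih =>
    simp only [List.all_cons, ih]
    cases f x <;> cases g x <;> cases m.all f <;> cases m.all g <;> rfl

lemma pvAll_swap {α β : Type} (l : List α) (m : List β) (f : α → β → Bool) :
    l.all (fun x => m.all (fun y => f x y)) = m.all (fun y => l.all (fun x => f x y)) := by
  induction l with
  | nil => simp
  | cons x l ih => simp only [List.all_cons, ih, ← pvAll_and]

lemma pvAll_congr {α : Type} {l : List α} {f g : α → Bool} (h : ∀ x ∈ l, f x = g x) :
    l.all f = l.all g := by
  induction l with
  | nil => rfl
  | cons x l ih => simp only [List.all_cons, h x (by simp), ih (fun y hy => h y (by simp [hy]))]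

-- ---- the per-entry chain factorization ----
lemma pvAdjAll_of_gt {k : Int} {F : List (List Int)} {L : List (Int × Int)}
    (h : ∀ p ∈ L, k < p.1) : pvAdjAll k F L = true := by
  rw [pvAdjAll, List.all_eq_true]
  intro pq hpq
  have h1 : pq.1 ∈ L := (List.of_mem_zip hpq).1
  have h2 := h pq.1 h1
  simp [show ¬(pq.1.1 = k) from by omega]

lemma pvEntry_adj (k : Int) (F : List (List Int)) (L : List (Int × Int))
    (hs : (L.map Prod.fst).Pairwise (· < ·)) :
    pvEntryOK k F (pvLook L) = pvAdjAll k F L := by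
  induction L with
  | nil => rfl
  | cons va L ih =>
    have hpc : (va.1 :: L.map Prod.fst).Pairwise (· < ·) := by simpa using hs
    have hgt : ∀ p ∈ L, va.1 < p.1 :=
      fun p hp => (List.pairwise_cons.mp hpc).1 p.1 (List.mem_map_of_mem hp)
    have hs' : (L.map Prod.fst).Pairwise (· < ·) := (List.pairwise_cons.mp hpc).2
    by_cases hkv : k = va.1
    · -- σ k = some va.2
      cases L with
      | nil => simp [pvEntryOK, pvLook, pvAdjAll, hkv]
      | cons wb r =>
        have hw : k < wb.1 := hkv ▸ hgt wb (by simp)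
        have hpc2 : (wb.1 :: r.map Prod.fst).Pairwise (· < ·) := by simpa using hs'
        have hr : ∀ p ∈ r, wb.1 < p.1 :=
          fun p hp => (List.pairwise_cons.mp hpc2).1 p.1 (List.mem_map_of_mem hp)
        have htail : pvAdjAll k F (wb :: r) = true :=
          pvAdjAll_of_gt (by
            intro p hp
            rcases List.mem_cons.mp hp with rfl | hp'
            · exact hw
            · exact lt_trans hw (hr p hp'))
        have hadj : pvAdjAll k F (va :: wb :: r)
            = (!(decide (va.1 = k) && decide (wb.1 = va.1 + 1) && F.contains [va.2, wb.2])) := by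
          show ((((va, wb) :: ((wb :: r).zip r))).all _) = _
          rw [List.all_cons]
          have := htail
          rw [pvAdjAll] at this
          rw [show ((wb :: r).zip (wb :: r).tail) = ((wb :: r).zip r) from rfl] at this
          rw [this, Bool.and_true]
        rw [hadj]
        by_cases hw1 : wb.1 = k + 1
        · have h2 : pvLook (va :: wb :: r) (k + 1) = some wb.2 := by
            have : ¬ (k + 1 = va.1) := by omega
            simp [pvLook, this, hw1]
          have h1 : pvLook (va :: wb :: r) k = some va.2 := by simp [pvLook, hkv]
          simp only [pvEntryOK, h1, h2]
          rw [← hkv]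
          simp [hw1]
        · have h2 : pvLook (va :: wb :: r) (k + 1) = none := by
            have hne1 : ¬ (k + 1 = va.1) := by omega
            have hne2 : ¬ (k + 1 = wb.1) := fun e => hw1 e.symm
            have hrr : pvLook r (k + 1) = none := pvLook_none (by
              intro p hp
              have := hr p hp
              omega)
            simp [pvLook, hne1, hne2, hrr]
          have h1 : pvLook (va :: wb :: r) k = some va.2 := by simp [pvLook, hkv]
          simp only [pvEntryOK, h1, h2]
          rw [← hkv]
          simp [hw1]
    · -- k ≠ va.1
      have hhead : ∀ wb r, L = wb :: r →
          pvAdjAll k F (va :: L) = pvAdjAll k F L := by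
        intro wb r hL
        subst hL
        show (((va, wb) :: ((wb :: r).zip r)).all _) = _
        rw [List.all_cons]
        have hvk : va.1 ≠ k := Ne.symm hkv
        simp only [show decide (va.1 = k) = false from by simp [hvk]]
        rw [Bool.false_and, Bool.false_and, Bool.not_false, Bool.true_and]
        rfl
      by_cases hk1v : k + 1 = va.1
      · -- σ (k+1) = some va.2, σ k = none
        have h1 : pvLook (va :: L) k = none := by
          have hrr : pvLook L k = none := pvLook_none (by
            intro p hp
            have := hgt p hp
            omega)
          simp [pvLook, hkv, hrr]
        have hAtrue : pvAdjAll k F (va :: L) = true := by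
          cases L with
          | nil => rfl
          | cons wb r =>
            rw [hhead wb r rfl]
            exact pvAdjAll_of_gt (by
              intro p hp
              have := hgt p hp
              omega)
        rw [hAtrue]
        simp [pvEntryOK, h1]
      · -- both lookups skip the head
        have h1 : pvLook (va :: L) k = pvLook L k := by simp [pvLook, hkv]
        have h2 : pvLook (va :: L) (k + 1) = pvLook L (k + 1) := by simp [pvLook, hk1v]
        have hE : pvEntryOK k F (pvLook (va :: L)) = pvEntryOK k F (pvLook L) := by
          rw [pvEntryOK, pvEntryOK, h1, h2]
        rw [hE, ih hs']
        cases L with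
        | nil => rfl
        | cons wb r => rw [hhead wb r rfl]

lemma pvZipAll_ECh (cs : List (Int × List (List Int))) (L : List (Int × Int)) :
    ∀ pv pb, ((((pv, pb) :: L).zip L).all
      (fun pq => pvEdge cs pq.1.1 pq.1.2 pq.2.1 pq.2.2)) = pvECh cs pv pb L := by
  induction L with
  | nil => intro pv pb; rfl
  | cons wb r ih =>
    intro pv pb
    simp only [List.zip_cons_cons, List.all_cons, pvECh]
    rw [← ih wb.1 wb.2]

lemma pvOk_chain (cs : List (Int × List (List Int))) (L : List (Int × Int))
    (hs : (L.map Prod.fst).Pairwise (· < ·)) :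
    pvOkF cs (pvLook L) = (L.zip L.tail).all (fun pq => pvEdge cs pq.1.1 pq.1.2 pq.2.1 pq.2.2) := by
  rw [pvOkF, pvAll_congr (fun kF _ => pvEntry_adj kF.1 kF.2 L hs)]
  simp only [pvAdjAll]
  rw [pvAll_swap]
  rfl

lemma pvECh_sum (cs : List (Int × List (List Int))) (vs : List Int) :
    ∀ pv pb, ((pvBL vs.length).map
      (fun bs => if pvECh cs pv pb (vs.zip bs) then (1 : Int) else 0)).sum = pvG cs pv pb vs := by
  induction vs with
  | nil => intro pv pb; simp [pvBL, pvECh, pvG]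
  | cons v vs ih =>
    intro pv pb
    have half : ∀ b0 : Int,
        ((pvBL vs.length).map
          (fun bs => if pvECh cs pv pb ((v :: vs).zip (b0 :: bs)) then (1 : Int) else 0)).sum
        = if pvEdge cs pv pb v b0 then pvG cs v b0 vs else 0 := by
      intro b0
      cases he : pvEdge cs pv pb v b0
      · have hz : ∀ bs ∈ pvBL vs.length,
            (if pvECh cs pv pb ((v :: vs).zip (b0 :: bs)) then (1 : Int) else 0) = 0 := by
          intro bs _
          simp [List.zip_cons_cons, pvECh, he]
        rw [List.map_congr_left hz]
        simp [he]
      · have hz : ∀ bs ∈ pvBL vs.length,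
            (if pvECh cs pv pb ((v :: vs).zip (b0 :: bs)) then (1 : Int) else 0)
              = (if pvECh cs v b0 (vs.zip bs) then (1 : Int) else 0) := by
          intro bs _
          simp [List.zip_cons_cons, pvECh, he]
        rw [List.map_congr_left hz, ih v b0]
        simp [he]
    simp only [List.length_cons, pvBL, List.map_append, List.map_map, List.sum_append, pvG,
      Function.comp_def]
    rw [half 0, half 1]

lemma pvMain_sorted (cs : List (Int × List (List Int))) (v0 : Int) (vs : List Int)
    (hs : (v0 :: vs).Pairwise (· < ·)) :
    pvM cs (v0 :: vs) (fun _ => none) = pvG cs v0 0 vs + pvG cs v0 1 vs := by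
  rw [pvM_BL]
  simp only [List.length_cons, pvBL, List.map_append, List.map_map, List.sum_append,
    Function.comp_def]
  have half : ∀ b0 : Int,
      ((pvBL vs.length).map
        (fun bs => if pvOkF cs (pvUpds (fun _ => none) ((v0 :: vs).zip (b0 :: bs)))
          then (1 : Int) else 0)).sum = pvG cs v0 b0 vs := by
    intro b0
    rw [← pvECh_sum cs vs v0 b0]
    apply congrArg
    apply List.map_congr_left
    intro bs hbs
    have hlen : bs.length = vs.length := pvBL_len hbs
    have hzip : (v0 :: vs).zip (b0 :: bs) = (v0, b0) :: vs.zip bs := rfl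
    have hkeys0 : ((vs.zip bs).map Prod.fst) = vs := List.map_fst_zip (by omega)
    have hkeys : (((v0, b0) :: vs.zip bs).map Prod.fst) = v0 :: vs := by simp [hkeys0]
    have hpw : ((((v0, b0) :: vs.zip bs)).map Prod.fst).Pairwise (· < ·) := by
      rw [hkeys]; exact hs
    have hnd : ((((v0, b0) :: vs.zip bs)).map Prod.fst).Nodup := hpw.imp ne_of_lt
    have hσ : pvUpds (fun _ => none) ((v0, b0) :: vs.zip bs)
        = pvLook ((v0, b0) :: vs.zip bs) := by
      funext j
      rw [pvUpds_eq_look _ _ j hnd]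
      cases pvLook ((v0, b0) :: vs.zip bs) j <;> rfl
    rw [hzip, hσ]
    rw [show pvOkF cs (pvLook ((v0, b0) :: vs.zip bs))
        = ((((v0, b0) :: vs.zip bs).zip ((v0, b0) :: vs.zip bs).tail).all
            (fun pq => pvEdge cs pq.1.1 pq.1.2 pq.2.1 pq.2.2)) from pvOk_chain cs _ hpw]
    rw [show (((v0, b0) :: vs.zip bs).zip ((v0, b0) :: vs.zip bs).tail).all
          (fun pq => pvEdge cs pq.1.1 pq.1.2 pq.2.1 pq.2.2)
        = pvECh cs v0 b0 (vs.zip bs) from pvZipAll_ECh cs (vs.zip bs) v0 b0]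
  rw [half 0, half 1]

-- ---- bridging pvEdge with B's first-match lookup (needs Pre_: distinct keys) ----
lemma pvEdge_find (cs : List (Int × List (List Int))) (hnd : (cs.map Prod.fst).Nodup)
    (pv a v b : Int) :
    pvEdge cs pv a v b =
      if v = pv + 1 then
        (match pvFindForb cs pv with | some F => !F.contains [a, b] | none => true)
      else true := by
  induction cs with
  | nil => simp [pvEdge, pvFindForb]
  | cons kF rest ih =>
    obtain ⟨k, F⟩ := kF
    have hnotin : k ∉ rest.map Prod.fst := (List.nodup_cons.mp (by simpa using hnd)).1
    have hnd' : (rest.map Prod.fst).Nodup := (List.nodup_cons.mp (by simpa using hnd)).2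
    by_cases hv : v = pv + 1
    · by_cases hk : pv = k
      · subst hk
        have hfind : pvFindForb ((pv, F) :: rest) pv = some F := by simp [pvFindForb]
        have hrest : rest.all
            (fun p => !(decide (pv = p.1) && decide (v = pv + 1) && p.2.contains [a, b])) = true := by
          rw [List.all_eq_true]
          intro p hp
          have hne : ¬ (pv = p.1) := fun e => hnotin (e ▸ List.mem_map_of_mem hp)
          simp [hne]
        have hEdge : pvEdge ((pv, F) :: rest) pv a v b
            = (!(decide (pv = pv) && decide (v = pv + 1) && F.contains [a, b])) := by
          rw [pvEdge, List.all_cons, hrest, Bool.and_true]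
        rw [hEdge, hfind]
        simp [hv]
      · have hkp : ¬ (k = pv) := fun e => hk (Eq.symm e)
        have hfind : pvFindForb ((k, F) :: rest) pv = pvFindForb rest pv := by
          simp [pvFindForb, hkp]
        have hhead : (!(decide (pv = k) && decide (v = pv + 1) && F.contains [a, b])) = true := by
          simp [hk]
        have hEdge : pvEdge ((k, F) :: rest) pv a v b = pvEdge rest pv a v b := by
          rw [pvEdge, List.all_cons, hhead, Bool.true_and, pvEdge]
        rw [hEdge, hfind, ih hnd']
    · simp [pvEdge, hv]

lemma pvFold (cs : List (Int × List (List Int))) (hnd : (cs.map Prod.fst).Nodup) (vs : List Int) :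
    ∀ (v0 : Int) (f0 f1 : Int),
    ((((v0 :: vs).zip vs).foldl (pvStepB cs) (f0, f1)).1
      + (((v0 :: vs).zip vs).foldl (pvStepB cs) (f0, f1)).2)
    = f0 * pvG cs v0 0 vs + f1 * pvG cs v0 1 vs := by
  induction vs with
  | nil => intro v0 f0 f1; simp [pvG]; try ring
  | cons v vs ih =>
    intro v0 f0 f1
    simp only [List.zip_cons_cons, List.foldl_cons]
    have hstep := ih v (pvStepB cs (f0, f1) (v0, v)).1 (pvStepB cs (f0, f1) (v0, v)).2
    rw [Prod.mk.eta] at hstep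
    rw [hstep]
    simp only [pvG]
    rw [pvEdge_find cs hnd v0 0 v 0, pvEdge_find cs hnd v0 0 v 1,
        pvEdge_find cs hnd v0 1 v 0, pvEdge_find cs hnd v0 1 v 1]
    by_cases hv : v = v0 + 1
    · cases hf : pvFindForb cs v0 with
      | none =>
        have hcond : ¬ ((v0, v).2 = (v0, v).1 + 1 ∧ (pvFindForb cs (v0, v).1).isSome) := by
          simp [hf]
        rw [pvStepB, if_neg hcond]
        simp [hv, hf]
        try ring
      | some F =>
        have hcond : ((v0, v).2 = (v0, v).1 + 1 ∧ (pvFindForb cs (v0, v).1).isSome) := by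
          simp [hv, hf]
        rw [pvStepB, if_pos hcond]
        simp only [hv, hf, if_pos rfl, Option.getD_some]
        cases h00 : F.contains [0, 0] <;> cases h01 : F.contains [0, 1] <;>
          cases h10 : F.contains [1, 0] <;> cases h11 : F.contains [1, 1] <;>
          simp [h00, h01, h10, h11, hf, hv] <;> try ring
    · have hcond : ¬ ((v0, v).2 = (v0, v).1 + 1 ∧ (pvFindForb cs (v0, v).1).isSome) := by
        simp [hv]
      rw [pvStepB, if_neg hcond]
      simp [hv]
      try ring

-- ===== VERDICT (by name: the statement is the Claim_ definition above) =====
theorem count_valid_for_component_spec : Claim_equal_count_valid_for_component := by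
  intro cp cs _ hpre
  unfold Spec_count_valid_for_component
  rw [pvCountA]
  simp only [count_valid_for_component_alt]
  set vals := PySem.List.sorted (PySem.Set.ofList cp) (fun x => x) false with hvals
  by_cases hnil : vals = []
  · have hcp : cp = [] := by
      rcases hcp0 : cp with _ | ⟨x, cp'⟩
      · rfl
      · exfalso
        have hofnil : PySem.Set.ofList cp = [] :=
          (PySem.List.sorted_eq_nil_iff _ _ _).mp (hvals ▸ hnil)
        have hx : x ∈ PySem.Set.ofList cp := by
          rw [PySem.Set.mem_ofList, hcp0]; simp
        rw [hofnil] at hx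
        simp at hx
    subst hcp
    rw [if_pos hnil]
    have hok : pvOkF cs (fun _ => none) = true := by
      rw [pvOkF, List.all_eq_true]; intro kF _; rfl
    simp [pvM, hok]
  · rw [if_neg hnil]
    obtain ⟨v0, vs, hv⟩ := List.exists_cons_of_ne_nil hnil
    have hpw : vals.Pairwise (· < ·) := PySem.List.sorted_ofList_pairwise_lt cp
    have hndv : vals.Nodup := hpw.imp ne_of_lt
    have hperm : (pvDdl cp).Perm vals :=
      (List.perm_ext_iff_of_nodup (pvDdl_nodup cp) hndv).mpr (fun x => by
        rw [pvDdl_mem, hvals, PySem.List.mem_sorted, PySem.Set.mem_ofList])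
    rw [pvM_dup cs cp, pvM_perm cs hperm (pvDdl_nodup cp), hv]
    rw [pvMain_sorted cs v0 vs (hv ▸ hpw)]
    simp only [List.tail_cons]
    have hfold := pvFold cs hpre vs v0 1 1
    rw [hfold]
    rw [show (pvDdl cp).length = (v0 :: vs).length from by rw [← hv, hperm.length_eq]]
    ring
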